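-- pv_equiv track=rewrite | github.com/lufvelasquezgo/llg | tests/ffunctions/spin_fields/build_sc.py | build_sc
-- ===== SOURCE A (Python) =====
-- from itertools import product
-- from collections import defaultdict
--
-- def build_sc(l):
--     sites = list()
--     index = dict()
--     for x, y in product(range(l), range(l)):
--         site = x, y
--         sites.append(site)
--         index[site] = sites.index(site)
--
--     num_sites = len(sites)
--     neigh = defaultdict(list)
--
--     for site in sites:
--         x, y = site
--         neigh[site].append(sites.index(((x+1) % l, y)))
--         neigh[site].append(sites.index(((x-1) % l, y)))
--         neigh[site].append(sites.index((x, (y+1) % l)))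
--         neigh[site].append(sites.index((x, (y-1) % l)))
--
--     neighbors_indexes = list()
--     num_neighbors = list()
--     for neighs in neigh.values():
--         neighbors_indexes += neighs
--         num_neighbors.append(len(neighs))
--
--     num_interactions = len(neighbors_indexes)
--
--     return num_sites, num_interactions, neighbors_indexes, num_neighbors
-- ===== SOURCE B (Python) =====
-- def build_sc(l):
--     # work on flat site indices i = x*l + y: periodic ±l moves mod n (vertical),
--     # row-local ±1 moves r + (i±1)%l where r = i - i%l (horizontal);
--     # four per-direction passes, interleaved with zip
--     n = len(range(l)) ** 2
--     east = [(i + l) % n for i in range(n)]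
--     west = [(i - l) % n for i in range(n)]
--     north = [i - i % l + (i + 1) % l for i in range(n)]
--     south = [i - i % l + (i - 1) % l for i in range(n)]
--     neighbors_indexes = [v for quad in zip(east, west, north, south) for v in quad]
--     return n, 4 * n, neighbors_indexes, [4] * n
-- ===== Notes on version B (the rewrite author's own statement) =====
-- stated objective: alternative
-- what changed: B never forms (x,y) coordinates, a sites list, an index dict or a defaultdict: it works on flat site indices, building four per-direction neighbor lists in separate passes by modular arithmetic on the flat index ((i±l) mod n² vertically, row base + (i±1) mod l horizontally) and interleaving them with zip, replacing A's per-site list.index scans.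
import Mathlib
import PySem

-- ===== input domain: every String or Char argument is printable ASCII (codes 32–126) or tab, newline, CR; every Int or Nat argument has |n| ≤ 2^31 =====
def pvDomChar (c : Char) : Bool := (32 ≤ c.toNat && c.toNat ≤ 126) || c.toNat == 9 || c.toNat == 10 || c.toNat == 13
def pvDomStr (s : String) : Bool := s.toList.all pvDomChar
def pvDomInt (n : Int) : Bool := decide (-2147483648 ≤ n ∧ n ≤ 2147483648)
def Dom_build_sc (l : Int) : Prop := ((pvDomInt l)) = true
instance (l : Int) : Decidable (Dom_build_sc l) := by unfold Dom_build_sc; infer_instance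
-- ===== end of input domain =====

-- B drops A's (x,y) coordinates, sites list, index dict and defaultdict: it works on flat site
-- indices, builds four per-direction neighbor lists in separate passes by modular arithmetic on
-- the flat index and interleaves them with zip (objective: alternative algorithm, asymptotically faster).

-- ===== PORT A =====
def build_sc (l : Int) : Int × Int × List Int × List Int :=
  -- for x, y in product(range(l), range(l)): sites.append(site); index[site] = sites.index(site)
  let p :=
    ((PySem.List.pyRange 0 l 1).flatMap
        (fun x => (PySem.List.pyRange 0 l 1).map (fun y => (x, y)))).foldl
      (fun (st : List (Int × Int) × PySem.Dict (Int × Int) Int) site =>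
        let sites := st.1 ++ [site]
        -- sites.index(site) always succeeds (site was just appended), so none is unreachable
        (sites, st.2.insert site (((PySem.List.index? sites site).getD 0 : Nat) : Int)))
      ([], PySem.Dict.empty)
  let sites := p.1
  let num_sites : Int := (sites.length : Int)
  -- for site in sites: neigh[site].append(sites.index(...)) four times; each looked-up neighbor
  -- is itself a site, so sites.index always returns (proved below) and getD 0 is unreachable
  let neigh : PySem.Dict (Int × Int) (List Int) :=
    sites.foldl
      (fun d site =>
        let x := site.1
        let y := site.2
        let d := d.insert site (d.getD site [] ++ [(((PySem.List.index? sites (PySem.Int.mod (x + 1) l, y)).getD 0 : Nat) : Int)])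
        let d := d.insert site (d.getD site [] ++ [(((PySem.List.index? sites (PySem.Int.mod (x - 1) l, y)).getD 0 : Nat) : Int)])
        let d := d.insert site (d.getD site [] ++ [(((PySem.List.index? sites (x, PySem.Int.mod (y + 1) l)).getD 0 : Nat) : Int)])
        let d := d.insert site (d.getD site [] ++ [(((PySem.List.index? sites (x, PySem.Int.mod (y - 1) l)).getD 0 : Nat) : Int)])
        d)
      PySem.Dict.empty
  -- for neighs in neigh.values(): neighbors_indexes += neighs; num_neighbors.append(len(neighs))
  let q := neigh.values.foldl
    (fun (st : List Int × List Int) neighs => (st.1 ++ neighs, st.2 ++ [(neighs.length : Int)]))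
    ([], [])
  (num_sites, (q.1.length : Int), q.1, q.2)

-- ===== PORT B =====
def build_sc_alt (l : Int) : Int × Int × List Int × List Int :=
  -- n = len(range(l)) ** 2
  let n : Int := ((PySem.List.pyRange 0 l 1).length : Int) ^ 2
  let rn := PySem.List.pyRange 0 n 1
  -- four per-direction comprehensions over the flat indices (the % n / % l are dead on an empty range)
  let east := rn.map (fun i => PySem.Int.mod (i + l) n)
  let west := rn.map (fun i => PySem.Int.mod (i - l) n)
  let north := rn.map (fun i => i - PySem.Int.mod i l + PySem.Int.mod (i + 1) l)
  let south := rn.map (fun i => i - PySem.Int.mod i l + PySem.Int.mod (i - 1) l)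
  -- [v for quad in zip(east, west, north, south) for v in quad]
  let neighbors_indexes := (east.zip (west.zip (north.zip south))).flatMap
      (fun q => [q.1, q.2.1, q.2.2.1, q.2.2.2])
  -- [4] * n: n ≥ 0, so replicate is exact
  (n, 4 * n, neighbors_indexes, List.replicate n.toNat 4)

-- ===== PRECONDITION & SPEC =====
def Spec_build_sc (l : Int) (out : Int × Int × List Int × List Int) : Prop := out = build_sc_alt l
instance (l : Int) (out : Int × Int × List Int × List Int) : Decidable (Spec_build_sc l out) := by unfold Spec_build_sc; infer_instance

-- ===== CLAIM (what is proved, stated in full; the proofs are below) =====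
def Claim_equal_build_sc : Prop := ∀ (l : Int), Dom_build_sc l → Spec_build_sc l (build_sc l)

-- ===== LEMMAS AND PROOFS =====

-- the sites list A builds, as a pure expression (for l > 0, with n = l.toNat)
def pvSites (n : Nat) : List (Int × Int) :=
  (List.range n).flatMap (fun (i : Nat) => (List.range n).map (fun (j : Nat) => ((i : Int), (j : Int))))

-- the four neighbor indices A appends for one site
def pvF (l : Int) (sites : List (Int × Int)) (s : Int × Int) : List Int :=
  [(((PySem.List.index? sites (PySem.Int.mod (s.1 + 1) l, s.2)).getD 0 : Nat) : Int),
   (((PySem.List.index? sites (PySem.Int.mod (s.1 - 1) l, s.2)).getD 0 : Nat) : Int),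
   (((PySem.List.index? sites (s.1, PySem.Int.mod (s.2 + 1) l)).getD 0 : Nat) : Int),
   (((PySem.List.index? sites (s.1, PySem.Int.mod (s.2 - 1) l)).getD 0 : Nat) : Int)]

-- the common value both neighbor lists are proved equal to: x-major nested sweep with the
-- four closed-form neighbor indices
def pvC (n : Nat) : List Int :=
  (List.range n).flatMap (fun (x : Nat) => (List.range n).flatMap (fun (y : Nat) =>
    [PySem.Int.mod ((x : Int) + 1) (n : Int) * (n : Int) + (y : Int),
     PySem.Int.mod ((x : Int) - 1) (n : Int) * (n : Int) + (y : Int),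
     (x : Int) * (n : Int) + PySem.Int.mod ((y : Int) + 1) (n : Int),
     (x : Int) * (n : Int) + PySem.Int.mod ((y : Int) - 1) (n : Int)]))

lemma pv_range_split' (k m : Nat) :
    List.range (k + (m + 1)) = List.range k ++ k :: (List.range m).map (fun t => k + 1 + t) := by
  rw [List.range_add, List.range_succ_eq_map, List.map_cons, List.map_map]
  simp only [Nat.add_zero, List.append_cancel_left_eq, List.cons.injEq, true_and]
  exact List.map_congr_left (fun t _ => by simp [Function.comp]; omega)

lemma pv_range_split (k n : Nat) (h : k < n) :
    List.range n = List.range k ++ k :: (List.range (n - k - 1)).map (fun t => k + 1 + t) := by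
  have h2 := pv_range_split' k (n - k - 1)
  rw [show k + (n - k - 1 + 1) = n from by omega] at h2
  exact h2

lemma pv_length_pvSites (n : Nat) : (pvSites n).length = n * n := by
  simp [pvSites, List.length_flatMap, List.map_const', List.sum_replicate, smul_eq_mul]

lemma pv_nodup_pvSites (n : Nat) : (pvSites n).Nodup := by
  unfold pvSites
  rw [List.nodup_flatMap]
  constructor
  · intro i _
    refine (List.nodup_range).map ?_
    intro a b hab
    simpa using hab
  · refine List.pairwise_lt_range.imp ?_
    intro a b hab
    simp only [Function.onFun, List.disjoint_left, List.mem_map, List.mem_range]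
    rintro p ⟨j, _, rfl⟩ ⟨j', _, hp⟩
    have h1 : ((b : Int)) = (a : Int) := congrArg Prod.fst hp
    have : b = a := by exact_mod_cast h1
    omega

lemma pv_index_pvSites (n a b : Nat) (ha : a < n) (hb : b < n) :
    PySem.List.index? (pvSites n) ((a : Int), (b : Int)) = some (a * n + b) := by
  rw [PySem.List.index?_eq_some_iff]
  refine ⟨(List.range a).flatMap (fun (i : Nat) => (List.range n).map (fun (j : Nat) => ((i : Int), (j : Int))))
      ++ (List.range b).map (fun (j : Nat) => ((a : Int), (j : Int))),
    (List.range (n - b - 1)).map (fun (t : Nat) => ((a : Int), ((b + 1 + t : Nat) : Int)))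
      ++ (List.range (n - a - 1)).flatMap
          (fun (i : Nat) => (List.range n).map (fun (j : Nat) => (((a + 1 + i : Nat) : Int), (j : Int)))), ?_, ?_, ?_⟩
  · unfold pvSites
    nth_rewrite 2 [pv_range_split a n ha]
    rw [List.flatMap_append, List.flatMap_cons]
    have hmid : (List.range n).map (fun (j : Nat) => ((a : Int), (j : Int)))
        = (List.range b).map (fun (j : Nat) => ((a : Int), (j : Int)))
          ++ ((a : Int), (b : Int)) :: (List.range (n - b - 1)).map (fun (t : Nat) => ((a : Int), ((b + 1 + t : Nat) : Int))) := by
      rw [pv_range_split b n hb, List.map_append, List.map_cons]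
      simp [List.map_map, Function.comp]
    rw [hmid]
    simp [List.append_assoc, List.flatMap_map]
  · simp [List.length_append, List.length_flatMap, List.map_const', List.sum_replicate, smul_eq_mul]
  · intro hmem
    simp only [List.mem_append, List.mem_flatMap, List.mem_map, List.mem_range, Prod.mk.injEq] at hmem
    rcases hmem with ⟨i, hi, j, _, hij, _⟩ | ⟨j, hj, _, hjb⟩
    · have : i = a := by exact_mod_cast hij
      omega
    · have : j = b := by exact_mod_cast hjb
      omega

lemma pv_idx_fst (n : Nat) (hn : 0 < n) (t : Int) (b : Nat) (hb : b < n) :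
    (((PySem.List.index? (pvSites n) (PySem.Int.mod t (n : Int), (b : Int))).getD 0 : Nat) : Int)
      = PySem.Int.mod t (n : Int) * (n : Int) + (b : Int) := by
  have h0 : (0 : Int) < (n : Int) := by exact_mod_cast hn
  have hnn := PySem.Int.mod_nonneg t h0
  have hlt := PySem.Int.mod_lt t h0
  have hcast : (((PySem.Int.mod t (n : Int)).toNat : Int)) = PySem.Int.mod t (n : Int) :=
    Int.toNat_of_nonneg hnn
  have haLt : (PySem.Int.mod t (n : Int)).toNat < n := by omega
  rw [← hcast, pv_index_pvSites n _ b haLt hb]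
  simp only [Option.getD_some]
  push_cast [hcast]
  ring

lemma pv_idx_snd (n : Nat) (hn : 0 < n) (a : Nat) (ha : a < n) (t : Int) :
    (((PySem.List.index? (pvSites n) ((a : Int), PySem.Int.mod t (n : Int))).getD 0 : Nat) : Int)
      = (a : Int) * (n : Int) + PySem.Int.mod t (n : Int) := by
  have h0 : (0 : Int) < (n : Int) := by exact_mod_cast hn
  have hnn := PySem.Int.mod_nonneg t h0
  have hlt := PySem.Int.mod_lt t h0
  have hcast : (((PySem.Int.mod t (n : Int)).toNat : Int)) = PySem.Int.mod t (n : Int) :=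
    Int.toNat_of_nonneg hnn
  have hbLt : (PySem.Int.mod t (n : Int)).toNat < n := by omega
  rw [← hcast, pv_index_pvSites n a _ ha hbLt]
  simp only [Option.getD_some]
  push_cast [hcast]
  ring

-- first component of A's sites/index loop: the appends rebuild the iterated list
lemma pv_sites_loop (g : (List (Int × Int) × PySem.Dict (Int × Int) Int) → (Int × Int) → PySem.Dict (Int × Int) Int) :
    ∀ (xs : List (Int × Int)) (acc : List (Int × Int)) (d : PySem.Dict (Int × Int) Int),
      (xs.foldl (fun st site => (st.1 ++ [site], g st site)) (acc, d)).1 = acc ++ xs := by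
  intro xs
  induction xs with
  | nil => intro acc d; simp
  | cons x xs ih => intro acc d; simp [List.foldl_cons, ih]

lemma pv_getD_of_not_contains (d : PySem.Dict (Int × Int) (List Int)) (s : Int × Int)
    (h : d.contains s = false) : d.getD s [] = [] := by
  have h2 : d.get? s = none := by
    rw [PySem.Dict.contains_eq_isSome_get?] at h
    exact Option.not_isSome_iff_eq_none.mp (by simp [h])
  simp [PySem.Dict.getD, h2]

-- the four in-place appends of A's neigh loop collapse into one insert of pvF
lemma pv_collapse (l : Int) (sites : List (Int × Int)) :
    (fun (d : PySem.Dict (Int × Int) (List Int)) (site : Int × Int) =>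
      let x := site.1
      let y := site.2
      let d := d.insert site (d.getD site [] ++ [(((PySem.List.index? sites (PySem.Int.mod (x + 1) l, y)).getD 0 : Nat) : Int)])
      let d := d.insert site (d.getD site [] ++ [(((PySem.List.index? sites (PySem.Int.mod (x - 1) l, y)).getD 0 : Nat) : Int)])
      let d := d.insert site (d.getD site [] ++ [(((PySem.List.index? sites (x, PySem.Int.mod (y + 1) l)).getD 0 : Nat) : Int)])
      let d := d.insert site (d.getD site [] ++ [(((PySem.List.index? sites (x, PySem.Int.mod (y - 1) l)).getD 0 : Nat) : Int)])
      d)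
    = (fun d site => d.insert site (d.getD site [] ++ pvF l sites site)) := by
  funext d site
  simp [PySem.Dict.getD_insert_self, PySem.Dict.insert_insert_self, pvF]

-- A's neigh loop over fresh distinct keys: the dict's items pair the sites with pvF
lemma pv_neigh_foldl (l : Int) (sites : List (Int × Int)) :
    ∀ (ss : List (Int × Int)) (d : PySem.Dict (Int × Int) (List Int)),
      (∀ s ∈ ss, d.contains s = false) → ss.Nodup →
      (ss.foldl (fun d site => d.insert site (d.getD site [] ++ pvF l sites site)) d).items
        = d.items ++ ss.map (fun s => (s, pvF l sites s)) := by
  intro ss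
  induction ss with
  | nil => intro d _ _; simp
  | cons s ss ih =>
    intro d hfresh hnd
    have hs : d.contains s = false := hfresh s (by simp)
    rw [List.nodup_cons] at hnd
    simp only [List.foldl_cons, pv_getD_of_not_contains d s hs, List.nil_append]
    have hfresh' : ∀ t ∈ ss, (d.insert s (pvF l sites s)).contains t = false := by
      intro t ht
      have hts : t ≠ s := fun h => hnd.1 (h ▸ ht)
      rw [PySem.Dict.contains_eq_isSome_get?, PySem.Dict.get?_insert_of_ne _ _ hts,
        ← PySem.Dict.contains_eq_isSome_get?]
      exact hfresh t (List.mem_cons_of_mem _ ht)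
    rw [ih _ hfresh' hnd.2, PySem.Dict.items_insert_of_not_contains _ _ hs]
    simp

-- the final output loop: concatenation and lengths of the dict's values
lemma pv_out_loop :
    ∀ (vs : List (List Int)) (acc1 acc2 : List Int),
      (vs.foldl (fun (st : List Int × List Int) neighs => (st.1 ++ neighs, st.2 ++ [(neighs.length : Int)])) (acc1, acc2))
        = (acc1 ++ vs.flatten, acc2 ++ vs.map (fun v => (v.length : Int))) := by
  intro vs
  induction vs with
  | nil => intro acc1 acc2; simp
  | cons v vs ih => intro acc1 acc2; simp [List.foldl_cons, ih]

-- A's flattened neighbor list equals the common closed form pvC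
lemma pv_A_list (n : Nat) (hn : 0 < n) :
    (List.map (pvF (n : Int) (pvSites n)) (pvSites n)).flatten = pvC n := by
  rw [← List.flatMap_def]
  unfold pvC
  nth_rewrite 2 [show pvSites n = (List.range n).flatMap
      (fun (i : Nat) => (List.range n).map (fun (j : Nat) => ((i : Int), (j : Int)))) from rfl]
  rw [List.flatMap_assoc]
  refine List.flatMap_congr ?_
  intro x hx
  rw [List.flatMap_map]
  refine List.flatMap_congr ?_
  intro y hy
  rw [List.mem_range] at hx hy
  simp only [pvF]
  rw [pv_idx_fst n hn ((x : Int) + 1) y hy, pv_idx_fst n hn ((x : Int) - 1) y hy,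
    pv_idx_snd n hn x hx ((y : Int) + 1), pv_idx_snd n hn x hx ((y : Int) - 1)]

-- flat index space split row-major
lemma pv_range_mul (n : Nat) :
    ∀ k, List.range (k * n) = (List.range k).flatMap (fun x => (List.range n).map (fun y => x * n + y)) := by
  intro k
  induction k with
  | zero => simp
  | succ k ih =>
    rw [Nat.succ_mul, List.range_add, ih, List.range_succ, List.flatMap_append]
    simp [Nat.add_comm]

-- row decomposition of a flat index: (x*n + t) % n = t % n (Int)
lemma pv_row_mod (n : Int) (x t : Int) : (x * n + t) % n = t % n := by
  rw [add_comm, mul_comm, Int.add_mul_emod_self_left]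

-- the four flat-index neighbor formulas of B agree with A's coordinate formulas
lemma pv_quad (n x y : Nat) (hn : 0 < n) (hx : x < n) (hy : y < n) :
    ([PySem.Int.mod (((x * n + y : Nat) : Int) + (n : Int)) ((n : Int) * (n : Int)),
      PySem.Int.mod (((x * n + y : Nat) : Int) - (n : Int)) ((n : Int) * (n : Int)),
      ((x * n + y : Nat) : Int) - PySem.Int.mod ((x * n + y : Nat) : Int) (n : Int) + PySem.Int.mod (((x * n + y : Nat) : Int) + 1) (n : Int),
      ((x * n + y : Nat) : Int) - PySem.Int.mod ((x * n + y : Nat) : Int) (n : Int) + PySem.Int.mod (((x * n + y : Nat) : Int) - 1) (n : Int)] : List Int)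
    = [PySem.Int.mod ((x : Int) + 1) (n : Int) * (n : Int) + (y : Int),
       PySem.Int.mod ((x : Int) - 1) (n : Int) * (n : Int) + (y : Int),
       (x : Int) * (n : Int) + PySem.Int.mod ((y : Int) + 1) (n : Int),
       (x : Int) * (n : Int) + PySem.Int.mod ((y : Int) - 1) (n : Int)] := by
  have h0 : (0 : Int) < (n : Int) := by exact_mod_cast hn
  have h00 : (0 : Int) < (n : Int) * (n : Int) := mul_pos h0 h0
  have hxI : (x : Int) < (n : Int) := by exact_mod_cast hx
  have hyI : (y : Int) < (n : Int) := by exact_mod_cast hy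
  push_cast
  simp only [PySem.Int.mod_eq_emod_of_pos h00, PySem.Int.mod_eq_emod_of_pos h0]
  have hyy : ((x : Int) * n + y) % n = (y : Int) := by
    rw [pv_row_mod]; exact Int.emod_eq_of_lt (by positivity) hyI
  have h1 : ((x : Int) * n + y + 1) % n = ((y : Int) + 1) % n := by
    rw [show (x : Int) * n + y + 1 = (x : Int) * n + (y + 1) by ring, pv_row_mod]
  have h2 : ((x : Int) * n + y - 1) % n = ((y : Int) - 1) % n := by
    rw [show (x : Int) * n + y - 1 = (x : Int) * n + (y - 1) by ring, pv_row_mod]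
  simp only [List.cons.injEq, and_true]
  refine ⟨?_, ?_, ?_, ?_⟩
  · -- east: (i + n) % n² = ((x+1) % n) * n + y
    by_cases hx1 : (x : Int) + 1 < (n : Int)
    · rw [Int.emod_eq_of_lt (by positivity) (by nlinarith),
        Int.emod_eq_of_lt (by positivity) hx1]
      ring
    · have hxe : (x : Int) + 1 = (n : Int) := by omega
      rw [show (x : Int) * n + y + n = (y : Int) + n * n * 1 by rw [← hxe]; ring,
        Int.add_mul_emod_self_left, Int.emod_eq_of_lt (by positivity) (by nlinarith),
        hxe, Int.emod_self]
      ring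
  · -- west: (i - n) % n² = ((x-1) % n) * n + y
    by_cases hx0 : 0 < x
    · have hx1I : (1 : Int) ≤ (x : Int) := by exact_mod_cast hx0
      rw [Int.emod_eq_of_lt (by nlinarith) (by nlinarith),
        Int.emod_eq_of_lt (by omega) (by omega)]
      ring
    · have hxe : (x : Nat) = 0 := by omega
      subst hxe
      simp only [Nat.cast_zero]
      have hm1 : ((0 : Int) - 1) % (n : Int) = (n : Int) - 1 := by
        rw [show (0 : Int) - 1 = ((n : Int) - 1) + n * (-1) by ring, Int.add_mul_emod_self_left,
          Int.emod_eq_of_lt (by omega) (by omega)]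
      rw [show (0 : Int) * n + y - n = ((n : Int) * n - n + y) + n * n * (-1) by ring,
        Int.add_mul_emod_self_left, Int.emod_eq_of_lt (by nlinarith) (by nlinarith), hm1]
      ring
  · rw [hyy, h1]; ring
  · rw [hyy, h2]; ring

-- ===== VERDICT (by name: the statement is the Claim_ definition above) =====
theorem build_sc_spec : Claim_equal_build_sc := by
  unfold Claim_equal_build_sc Spec_build_sc
  intro l _
  by_cases hl : l ≤ 0
  · -- l ≤ 0: range(l) is empty, both sides are (0, 0, [], [])
    have hr : PySem.List.pyRange 0 l 1 = [] := by
      rw [PySem.List.pyRange_zero]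
      simp [Int.toNat_of_nonpos hl]
    simp [build_sc, build_sc_alt, hr, PySem.Dict.values, PySem.Dict.empty]
  · -- l > 0: write l as a natural number n
    obtain ⟨n, hln⟩ : ∃ n : Nat, l = (n : Int) := ⟨l.toNat, by omega⟩
    have hn : 0 < n := by omega
    subst hln
    have hr : PySem.List.pyRange 0 (n : Int) 1 = (List.range n).map (fun (k : Nat) => (k : Int)) :=
      PySem.List.pyRange_zero_nat n
    -- ===== A's side, reduced to (n², 4n², pvC n, [4] * n²) =====
    have hsites : ((PySem.List.pyRange 0 (n : Int) 1).flatMap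
        (fun x => (PySem.List.pyRange 0 (n : Int) 1).map (fun y => (x, y)))) = pvSites n := by
      rw [hr, List.flatMap_map]
      simp [pvSites, List.map_map, Function.comp_def]
    simp only [build_sc, hsites, pv_sites_loop, List.nil_append, pv_collapse]
    have hfresh : ∀ s ∈ pvSites n, (PySem.Dict.empty : PySem.Dict (Int × Int) (List Int)).contains s = false := by
      intro s _; simp [PySem.Dict.contains_empty]
    rw [PySem.Dict.values,
      pv_neigh_foldl (↑n) (pvSites n) (pvSites n) PySem.Dict.empty hfresh (pv_nodup_pvSites n)]
    simp only [PySem.Dict.empty, List.nil_append, List.map_map]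
    have hmapF : (List.map ((fun (x : (Int × Int) × List Int) => x.2) ∘ fun s => (s, pvF (↑n) (pvSites n) s)) (pvSites n))
        = List.map (pvF (↑n) (pvSites n)) (pvSites n) := rfl
    rw [hmapF, pv_out_loop]
    simp only [List.nil_append, pv_A_list n hn]
    -- ===== B's side, reduced to the same =====
    have hlen : (PySem.List.pyRange 0 (n : Int) 1).length = n := by
      rw [hr, List.length_map, List.length_range]
    have hN : ((n : Int)) ^ 2 = ((n * n : Nat) : Int) := by push_cast; ring
    have hrn : PySem.List.pyRange 0 (((n : Int)) ^ 2) 1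
        = (List.range (n * n)).map (fun (k : Nat) => (k : Int)) := by
      rw [hN]; exact PySem.List.pyRange_zero_nat (n * n)
    simp only [build_sc_alt, hlen, hrn, List.zip_map', List.flatMap_map]
    -- the zipped flat-index quads over range(n²), regrouped row-major, give pvC n
    have hB : (List.range (n * n)).flatMap (fun (k : Nat) =>
          [PySem.Int.mod (((k : Nat) : Int) + (n : Int)) (((n : Int)) ^ 2),
           PySem.Int.mod (((k : Nat) : Int) - (n : Int)) (((n : Int)) ^ 2),
           ((k : Nat) : Int) - PySem.Int.mod ((k : Nat) : Int) (n : Int) + PySem.Int.mod (((k : Nat) : Int) + 1) (n : Int),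
           ((k : Nat) : Int) - PySem.Int.mod ((k : Nat) : Int) (n : Int) + PySem.Int.mod (((k : Nat) : Int) - 1) (n : Int)])
        = pvC n := by
      rw [pv_range_mul n n, List.flatMap_assoc]
      unfold pvC
      refine List.flatMap_congr ?_
      intro x hx
      rw [List.flatMap_map]
      refine List.flatMap_congr ?_
      intro y hy
      rw [List.mem_range] at hx hy
      have := pv_quad n x y hn hx hy
      rw [show ((n : Int)) ^ 2 = (n : Int) * (n : Int) by ring]
      exact this
    rw [hB]
    -- remaining: the scalar components and the [4] * n² list
    have hClen : (pvC n).length = n * (n * 4) := by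
      simp [pvC, List.length_flatMap, List.map_const', List.sum_replicate, smul_eq_mul]
    refine Prod.ext ?_ (Prod.ext ?_ (Prod.ext rfl ?_))
    · simp only [pv_length_pvSites]
      push_cast
      ring
    · simp only [hClen]
      push_cast
      ring
    · simp only [List.map_map]
      have h4 : (List.map ((fun (v : List Int) => ((v.length : Nat) : Int)) ∘ pvF (↑n) (pvSites n)) (pvSites n))
          = List.map (fun _ => (4 : Int)) (pvSites n) := List.map_congr_left (fun s _ => by simp [pvF])
      rw [h4, List.map_const', pv_length_pvSites]
      have : (((n : Int)) ^ 2).toNat = n * n := by rw [hN]; exact Int.toNat_natCast _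
      rw [this]
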